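-- pv_equiv track=rewrite | github.com/liucheng2912/py | leecode/easy/1725.py | countG
-- ===== SOURCE A (Python) =====
-- def countG(rectangles):
--     s={}
--     for i in rectangles:
--         n = min(i)
--         if n not in s:
--             s[n]=1
--         else:
--             s[n]+=1
--     max1 = max(s.values())
--     return max1
-- ===== SOURCE B (Python) =====
-- def countG(rectangles):
--     mins = sorted(min(r) for r in rectangles)
--     best = 0
--     run = 0
--     prev = None
--     for v in mins:
--         if v == prev:
--             run += 1
--         else:
--             prev = v
--             run = 1
--         if run > best:
--             best = run
--     return best
-- ===== Notes on version B (the rewrite author's own statement) =====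
-- stated objective: alternative
-- what changed: Replaces the hash tally (dict of min-value counts, then max over the values) by sorting the list of per-rectangle minima and scanning it once for the longest run of equal values.
import Mathlib
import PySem

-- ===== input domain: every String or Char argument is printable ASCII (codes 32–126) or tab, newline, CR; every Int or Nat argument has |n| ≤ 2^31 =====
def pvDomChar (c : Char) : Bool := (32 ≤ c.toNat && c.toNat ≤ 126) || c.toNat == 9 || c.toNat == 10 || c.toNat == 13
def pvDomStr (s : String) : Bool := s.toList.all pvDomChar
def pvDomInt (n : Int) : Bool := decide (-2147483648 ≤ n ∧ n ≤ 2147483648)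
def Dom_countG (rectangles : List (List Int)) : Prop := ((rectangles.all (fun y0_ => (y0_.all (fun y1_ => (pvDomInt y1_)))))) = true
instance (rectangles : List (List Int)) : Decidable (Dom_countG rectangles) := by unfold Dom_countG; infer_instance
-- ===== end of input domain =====

-- B replaces A's hash tally by sort-then-longest-run; same return value on Pre_ (alternative decomposition, not claimed faster).

-- ===== PORT A =====
-- min(i): Python's min of a nonempty list; Pre_ excludes empty inner lists (where Python raises ValueError)
def pyMin (r : List Int) : Int := (PySem.List.min? r (fun x => x)).getD 0

def countG (rectangles : List (List Int)) : Int :=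
  let s := rectangles.foldl (fun d i =>
    let n := pyMin i
    if d.contains n = false then d.insert n (1 : Int)
    else d.insert n (d.getD n 0 + 1)) PySem.Dict.empty
  -- max(s.values()); Pre_ excludes the empty dict (Python raises ValueError)
  (PySem.List.max? s.values (fun v => v)).getD 0

-- ===== PORT B =====
-- one step of B's loop body: update (prev, run, best) with the next sorted min
def bstep (acc : Option Int × Int × Int) (v : Int) : Option Int × Int × Int :=
  let pr := if acc.1 == some v then (acc.1, acc.2.1 + 1) else (some v, (1 : Int))
  let best := if pr.2 > acc.2.2 then pr.2 else acc.2.2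
  (pr.1, pr.2, best)

def countG_alt (rectangles : List (List Int)) : Int :=
  let mins := PySem.List.sorted (rectangles.map pyMin) (fun x => x) false
  (mins.foldl bstep (none, 0, 0)).2.2

-- ===== PRECONDITION & SPEC =====
-- Pre_ excludes exactly the inputs where A raises ValueError: an empty rectangles list
-- (max of an empty dict) and any empty inner list (min of an empty sequence).
def Pre_countG (rectangles : List (List Int)) : Prop :=
  rectangles ≠ [] ∧ ∀ r ∈ rectangles, r ≠ []
instance (rectangles : List (List Int)) : Decidable (Pre_countG rectangles) := by
  unfold Pre_countG; infer_instance
def pvWitness_countG : List (List Int) := [[3, 4], [5, 3], [7]]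

def Spec_countG (rectangles : List (List Int)) (out : Int) : Prop := out = countG_alt rectangles
instance (rectangles : List (List Int)) (out : Int) : Decidable (Spec_countG rectangles out) := by
  unfold Spec_countG; infer_instance

-- ===== CLAIM (what is proved, stated in full; the proofs are below) =====
def Claim_equal_countG : Prop := ∀ (rectangles : List (List Int)), Dom_countG rectangles → Pre_countG rectangles → Spec_countG rectangles (countG rectangles)

-- ===== LEMMAS AND PROOFS =====

-- max over the distinct values of p of their multiplicity in p (0 for p = [])
def BOf (p : List Int) : Int :=
  ((PySem.Set.ofList p).map (fun k => (p.count k : Int))).foldl max 0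

-- the exact loop state of B after consuming the sorted prefix p
def stateOf (p : List Int) : Option Int × Int × Int :=
  match p.getLast? with
  | none => (none, 0, 0)
  | some z => (some z, (p.count z : Int), BOf p)

theorem lmax_max (l : List Int) (a b : Int) :
    l.foldl max (max a b) = max a (l.foldl max b) := by
  induction l generalizing b with
  | nil => simp
  | cons x t ih => simpa [max_assoc] using ih (max b x)

theorem le_lmax_init (l : List Int) (a : Int) : a ≤ l.foldl max a := by
  induction l generalizing a with
  | nil => simp
  | cons x t ih => exact le_trans (le_max_left a x) (ih _)

theorem le_lmax_mem {l : List Int} {x : Int} (h : x ∈ l) (a : Int) : x ≤ l.foldl max a := by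
  induction l generalizing a with
  | nil => simp at h
  | cons y t ih =>
    rcases List.mem_cons.mp h with rfl | h
    · exact le_trans (le_max_right a x) (le_lmax_init t _)
    · exact ih h _

theorem lmax_bump (ks : List Int) (f g : Int → Int) (v : Int) :
    ∀ a, v ∈ ks → ks.Nodup → (∀ k ∈ ks, k ≠ v → g k = f k) → f v ≤ g v →
    (ks.map g).foldl max a = max ((ks.map f).foldl max a) (g v) := by
  induction ks with
  | nil => intro a hv; simp at hv
  | cons k t ih =>
    intro a hv hnd hfg hle
    rcases List.mem_cons.mp hv with rfl | hv
    · have hnot : v ∉ t := (List.nodup_cons.mp hnd).1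
      have : t.map g = t.map f := by
        apply List.map_congr_left
        intro x hx
        exact hfg x (List.mem_cons_of_mem _ hx) (fun he => hnot (he ▸ hx))
      simp only [List.map_cons, List.foldl_cons, this]
      rw [show max a (g v) = max (g v) a from max_comm _ _, lmax_max,
          show max a (f v) = max (f v) a from max_comm _ _, lmax_max]
      rw [max_comm (max (f v) _) (g v), ← max_assoc]
      congr 1
      exact (max_eq_left hle).symm
    · have hk : g k = f k := by
        rcases eq_or_ne k v with rfl | hne
        · exact absurd hv (List.nodup_cons.mp hnd).1
        · exact hfg k (List.mem_cons_self) hne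
      simp only [List.map_cons, List.foldl_cons, hk]
      exact ih (max a (f k)) hv (List.nodup_cons.mp hnd).2
        (fun x hx => hfg x (List.mem_cons_of_mem _ hx)) hle

theorem BOf_append_mem {p : List Int} {v : Int} (hv : v ∈ p) :
    BOf (p ++ [v]) = max (BOf p) ((p ++ [v]).count v : Int) := by
  have hset : PySem.Set.ofList (p ++ [v]) = PySem.Set.ofList p := by
    rw [PySem.Set.ofList_append_singleton,
        PySem.Set.add_of_mem ((PySem.Set.mem_ofList _ _).mpr hv)]
  unfold BOf
  rw [hset]
  exact lmax_bump (PySem.Set.ofList p)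
    (fun k => (p.count k : Int)) (fun k => ((p ++ [v]).count k : Int)) v 0
    ((PySem.Set.mem_ofList _ _).mpr hv) (PySem.Set.nodup_ofList p)
    (by intro k _ hk; simp [List.count_append, Ne.symm hk])
    (by simp [List.count_append])

theorem BOf_append_not_mem {p : List Int} {v : Int} (hv : v ∉ p) :
    BOf (p ++ [v]) = max (BOf p) 1 := by
  have hset : PySem.Set.ofList (p ++ [v]) = PySem.Set.ofList p ++ [v] := by
    rw [PySem.Set.ofList_append_singleton,
        PySem.Set.add_of_not_mem (fun h => hv ((PySem.Set.mem_ofList _ _).mp h))]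
  unfold BOf
  rw [hset, List.map_append]
  have hmap : (PySem.Set.ofList p).map (fun k => ((p ++ [v]).count k : Int))
      = (PySem.Set.ofList p).map (fun k => (p.count k : Int)) := by
    apply List.map_congr_left
    intro k hk
    have : k ≠ v := fun he => hv (he ▸ (PySem.Set.mem_ofList _ _).mp hk)
    simp [List.count_append, Ne.symm this]
  have hcv : ((p ++ [v]).count v : Int) = 1 := by
    simp [List.count_append, List.count_eq_zero.mpr hv]
  rw [List.map_cons, List.map_nil, List.foldl_append, hmap, hcv]
  simp only [List.foldl_cons, List.foldl_nil]

theorem one_le_BOf {p : List Int} (hp : p ≠ []) : 1 ≤ BOf p := by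
  obtain ⟨x, hx⟩ := List.exists_mem_of_ne_nil p hp
  have hxs : x ∈ PySem.Set.ofList p := (PySem.Set.mem_ofList _ _).mpr hx
  have hmem : ((p.count x : Int)) ∈ (PySem.Set.ofList p).map (fun k => (p.count k : Int)) := by
    refine List.mem_map.mpr ⟨x, hxs, rfl⟩
  have h1 : (1 : Int) ≤ (p.count x : Int) := by
    have : 0 < p.count x := List.count_pos_iff.mpr hx
    omega
  exact le_trans h1 (le_lmax_mem hmem 0)

theorem last_is_max {p : List Int} {z : Int} (hs : p.Pairwise (· ≤ ·))
    (hl : p.getLast? = some z) : ∀ a ∈ p, a ≤ z := by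
  induction p with
  | nil => simp at hl
  | cons x t ih =>
    intro a ha
    cases t with
    | nil =>
      simp at hl ha
      subst hl; subst ha; exact le_refl _
    | cons y u =>
      rw [List.getLast?_cons_cons] at hl
      rcases List.mem_cons.mp ha with rfl | ha
      · have hz : z ∈ y :: u := by
          have := List.mem_of_getLast? (l := y :: u) (a := z) hl
          exact this
        exact (List.pairwise_cons.mp hs).1 z hz
      · exact ih (List.pairwise_cons.mp hs).2 hl a ha

theorem stateOf_last {p : List Int} {z : Int} (hp : p.getLast? = some z) :
    stateOf p = (some z, (p.count z : Int), BOf p) := by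
  unfold stateOf; rw [hp]

theorem BOf_singleton (v : Int) : BOf [v] = 1 := by
  simp [BOf, PySem.Set.ofList_cons, PySem.Set.ofList_nil, PySem.Set.discard]

theorem bstep_stateOf {p : List Int} {v : Int} (hs : p.Pairwise (· ≤ ·))
    (hub : ∀ a ∈ p, a ≤ v) : bstep (stateOf p) v = stateOf (p ++ [v]) := by
  have hlast : (p ++ [v]).getLast? = some v := by simp
  cases hp : p.getLast? with
  | none =>
    have hnil : p = [] := List.getLast?_eq_none_iff.mp hp
    subst hnil
    rw [stateOf_last hlast]
    show bstep (none, 0, 0) v = _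
    simp [bstep, BOf_singleton]
  | some z =>
    have hpz : p ≠ [] := by intro h; subst h; simp at hp
    have hz : z ∈ p := List.mem_of_getLast? hp
    rw [stateOf_last hp, stateOf_last hlast]
    by_cases hzv : z = v
    · subst hzv
      have hcount : ((p ++ [z]).count z : Int) = (p.count z : Int) + 1 := by
        simp [List.count_append]
      rw [BOf_append_mem hz, hcount]
      have hb : bstep (some z, (p.count z : Int), BOf p) z
          = (some z, (p.count z : Int) + 1,
             if (p.count z : Int) + 1 > BOf p then (p.count z : Int) + 1 else BOf p) := by
        simp [bstep]
      rw [hb]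
      simp only [Prod.mk.injEq, true_and]
      split_ifs with h
      · exact (max_eq_right (le_of_lt h)).symm
      · exact (max_eq_left (not_lt.mp h)).symm
    · have hvp : v ∉ p := fun hvm =>
        hzv (le_antisymm (hub z hz) (last_is_max hs hp v hvm))
      have hcount : ((p ++ [v]).count v : Int) = 1 := by
        simp [List.count_append, List.count_eq_zero.mpr hvp]
      have h1 : 1 ≤ BOf p := one_le_BOf hpz
      have hbeq : ((some z : Option Int) == some v) = false := by
        simp [hzv]
      rw [BOf_append_not_mem hvp, hcount, max_eq_left h1]
      simp [bstep, hbeq, not_lt.mpr h1]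

theorem foldl_bstep (t : List Int) : ∀ p : List Int, (p ++ t).Pairwise (· ≤ ·) →
    t.foldl bstep (stateOf p) = stateOf (p ++ t) := by
  induction t with
  | nil => intro p _; simp
  | cons v t ih =>
    intro p hs
    have hs' : (p ++ [v] ++ t).Pairwise (· ≤ ·) := by simpa using hs
    have hub : ∀ a ∈ p, a ≤ v := by
      intro a ha
      have := (List.pairwise_append.mp hs).2.2 a ha v (List.mem_cons_self)
      exact this
    have hsp : p.Pairwise (· ≤ ·) := (List.pairwise_append.mp hs).1
    calc (v :: t).foldl bstep (stateOf p)
        = t.foldl bstep (bstep (stateOf p) v) := by simp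
      _ = t.foldl bstep (stateOf (p ++ [v])) := by rw [bstep_stateOf hsp hub]
      _ = stateOf (p ++ [v] ++ t) := ih (p ++ [v]) hs'
      _ = stateOf (p ++ (v :: t)) := by simp

theorem BOf_perm {l₁ l₂ : List Int} (h : l₁.Perm l₂) : BOf l₁ = BOf l₂ := by
  have hcount : ∀ k, l₁.count k = l₂.count k := fun k => h.count_eq k
  have hmap : (PySem.Set.ofList l₁).map (fun k => (l₁.count k : Int))
      = (PySem.Set.ofList l₁).map (fun k => (l₂.count k : Int)) := by
    apply List.map_congr_left; intro k _; rw [hcount k]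
  have hperm : (PySem.Set.ofList l₁).Perm (PySem.Set.ofList l₂) := by
    rw [List.perm_ext_iff_of_nodup (PySem.Set.nodup_ofList l₁) (PySem.Set.nodup_ofList l₂)]
    intro a
    rw [PySem.Set.mem_ofList _ _, PySem.Set.mem_ofList _ _]
    exact ⟨fun ha => h.mem_iff.mp ha, fun ha => h.mem_iff.mpr ha⟩
  unfold BOf
  rw [hmap]
  exact (List.Perm.foldl_eq (f := max) (hperm.map _)) 0

-- A's value equals BOf of the list of minima
theorem countG_eq_BOf (rectangles : List (List Int)) (hne : rectangles ≠ []) :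
    countG rectangles = BOf (rectangles.map pyMin) := by
  unfold countG
  set ms := rectangles.map pyMin with hms
  have hfold : rectangles.foldl (fun d i =>
      let n := pyMin i
      if d.contains n = false then d.insert n (1 : Int)
      else d.insert n (d.getD n 0 + 1)) PySem.Dict.empty
      = PySem.Dict.counter ms := by
    rw [hms, ← PySem.Dict.foldl_insert_getD_add_one_eq_counter, List.foldl_map]
    apply PySem.List.foldl_congr_mem
    intro d i _
    show (if d.contains (pyMin i) = false then d.insert (pyMin i) (1 : Int)
          else d.insert (pyMin i) (d.getD (pyMin i) 0 + 1))
        = d.insert (pyMin i) (d.getD (pyMin i) 0 + 1)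
    split_ifs with hc
    · rw [PySem.Dict.getD_of_not_contains d (0 : Int) hc]
      norm_num
    · rfl
  rw [hfold]
  show (PySem.List.max? (PySem.Dict.counter ms).values (fun v => v)).getD 0 = BOf ms
  have hvals : (PySem.Dict.counter ms).values
      = (PySem.Set.ofList ms).map (fun k => (ms.count k : Int)) := by
    show ((PySem.Dict.counter ms).items).map Prod.snd = _
    rw [PySem.Dict.items_counter]
    rw [List.map_map]
    rfl
  rw [hvals]
  have hmsne : ms ≠ [] := by
    intro h; apply hne
    rw [hms] at h
    exact List.map_eq_nil_iff.mp h
  obtain ⟨x, hx⟩ := List.exists_mem_of_ne_nil ms hmsne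
  have hsetne : PySem.Set.ofList ms ≠ [] := by
    intro h
    have := (PySem.Set.mem_ofList _ _).mpr hx
    rw [h] at this
    simp at this
  obtain ⟨c, cs, hcs⟩ := List.exists_cons_of_ne_nil hsetne
  rw [hcs]
  simp only [List.map_cons, PySem.List.max?_id_cons, Option.getD_some]
  unfold BOf
  rw [hcs]
  simp only [List.map_cons, List.foldl_cons]
  congr 1

-- B's value equals BOf of the list of minima
theorem countG_alt_eq_BOf (rectangles : List (List Int)) (hne : rectangles ≠ []) :
    countG_alt rectangles = BOf (rectangles.map pyMin) := by
  have hsorted : (PySem.List.sorted (rectangles.map pyMin) (fun x => x) false).Pairwise (· ≤ ·) := by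
    simpa using PySem.List.sorted_pairwise (rectangles.map pyMin) (fun x => x)
  have hperm : (PySem.List.sorted (rectangles.map pyMin) (fun x => x) false).Perm
      (rectangles.map pyMin) := PySem.List.sorted_perm _ _ _
  have hmsne : rectangles.map pyMin ≠ [] := fun h => hne (List.map_eq_nil_iff.mp h)
  have hsne : PySem.List.sorted (rectangles.map pyMin) (fun x => x) false ≠ [] := by
    intro h
    exact hmsne ((PySem.List.sorted_eq_nil_iff _ _ _).mp h)
  show (List.foldl bstep (none, 0, 0)
      (PySem.List.sorted (rectangles.map pyMin) (fun x => x) false)).2.2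
      = BOf (rectangles.map pyMin)
  rw [show ((none : Option Int), (0 : Int), (0 : Int)) = stateOf [] from rfl]
  have hfold := foldl_bstep (PySem.List.sorted (rectangles.map pyMin) (fun x => x) false) []
    (by simpa using hsorted)
  simp only [List.nil_append] at hfold
  rw [hfold]
  cases hlast : (PySem.List.sorted (rectangles.map pyMin) (fun x => x) false).getLast? with
  | none => exact absurd (List.getLast?_eq_none_iff.mp hlast) hsne
  | some z =>
    rw [stateOf_last hlast]
    exact BOf_perm hperm

-- ===== VERDICT (by name: the statement is the Claim_ definition above) =====
theorem countG_spec : Claim_equal_countG := by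
  intro rectangles _ hpre
  unfold Spec_countG
  rw [countG_eq_BOf rectangles hpre.1, countG_alt_eq_BOf rectangles hpre.1]
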